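-- pv_equiv track=rewrite | github.com/ghx312/Write_Ups | Hack.lu_CTF_2025/Crypto/MÄNUAL/MÄNUAL.py | gf2_invert
-- ===== SOURCE A (Python) =====
-- def gf2_invert(rows):
--     n = len(rows)
--     A = rows[:]
--     I = [1 << (n-1-r) for r in range(n)]
--     for col in range(n):
--         pivot_row = None
--         for r in range(col, n):
--             if (A[r] >> (n-1-col)) & 1:
--                 pivot_row = r
--                 break
--         if pivot_row is None:
--             raise RuntimeError("matrix not invertible")
--         if pivot_row != col:
--             A[col], A[pivot_row] = A[pivot_row], A[col]
--             I[col], I[pivot_row] = I[pivot_row], I[col]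
--         for r in range(n):
--             if r != col and ((A[r] >> (n-1-col)) & 1):
--                 A[r] ^= A[col]
--                 I[r] ^= I[col]
--     return I
-- ===== SOURCE B (Python) =====
-- def gf2_invert(rows):
--     n = len(rows)
--     A = rows[:]
--     I = [1 << (n-1-r) for r in range(n)]
--     # forward pass: reduce A to upper-triangular form with 1s on the diagonal
--     for col in range(n):
--         pivot_row = None
--         for r in range(col, n):
--             if (A[r] >> (n-1-col)) & 1:
--                 pivot_row = r
--                 break
--         if pivot_row is None:
--             raise RuntimeError("matrix not invertible")
--         if pivot_row != col:
--             A[col], A[pivot_row] = A[pivot_row], A[col]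
--             I[col], I[pivot_row] = I[pivot_row], I[col]
--         for r in range(col + 1, n):
--             if (A[r] >> (n-1-col)) & 1:
--                 A[r] ^= A[col]
--                 I[r] ^= I[col]
--     # back-substitution pass: clear the entries above each pivot
--     for col in range(n - 1, -1, -1):
--         for r in range(col):
--             if (A[r] >> (n-1-col)) & 1:
--                 A[r] ^= A[col]
--                 I[r] ^= I[col]
--     return I
-- ===== Notes on version B (the rewrite author's own statement) =====
-- stated objective: alternative
-- what changed: A's single Gauss-Jordan sweep (each pivot is xored into every other row immediately) is replaced by a forward-elimination pass that only clears entries below the pivot, leaving an upper-triangular matrix, followed by a separate back-substitution pass clearing the entries above each pivot; both yield the unique GF(2) inverse.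
import Mathlib
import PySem

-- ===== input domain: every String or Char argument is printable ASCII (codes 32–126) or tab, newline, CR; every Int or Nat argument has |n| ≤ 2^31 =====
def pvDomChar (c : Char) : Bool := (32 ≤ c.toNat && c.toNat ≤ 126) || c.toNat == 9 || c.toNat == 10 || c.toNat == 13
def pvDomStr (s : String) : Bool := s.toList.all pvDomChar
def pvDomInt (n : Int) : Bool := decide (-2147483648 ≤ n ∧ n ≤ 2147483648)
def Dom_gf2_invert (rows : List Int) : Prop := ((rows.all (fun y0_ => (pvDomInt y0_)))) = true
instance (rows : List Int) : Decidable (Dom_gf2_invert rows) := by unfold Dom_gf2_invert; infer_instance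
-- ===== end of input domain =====

-- B replaces A's single Gauss–Jordan sweep by a forward-elimination pass (pivots pushed only
-- downwards, leaving the matrix upper-triangular) followed by a separate back-substitution pass;
-- the proof shows both return the encoding of the unique GF(2) inverse (objective: alternative).

-- ===== PORT A =====
-- (x >> k) & 1 of Python (arbitrary-precision, two's complement): exact on Int
def pvBit (x : Int) (k : Nat) : Int := Int.land (Int.shiftRight x k) 1

-- Python's tuple swap A[i], A[j] = A[j], A[i]
def swapIdx (xs : List Int) (i j : Nat) : List Int :=
  (xs.set i (xs.getD j 0)).set j (xs.getD i 0)

-- inner `for r in range(col, n): if bit: pivot_row = r; break`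
def pivotSearchA (As : List Int) (n col r : Nat) : Option Nat :=
  if _h : r < n then
    if pvBit (As.getD r 0) (n - 1 - col) = 1 then some r
    else pivotSearchA As n col (r + 1)
  else none
termination_by n - r
decreasing_by omega

-- inner `for r in range(n): if r != col and bit: A[r] ^= A[col]; I[r] ^= I[col]`
def elimRowsA (n col : Nat) (st : List Int × List Int) : List Int × List Int :=
  (List.range n).foldl (fun st r =>
    if r ≠ col ∧ pvBit (st.1.getD r 0) (n - 1 - col) = 1 then
      (st.1.set r (Int.xor (st.1.getD r 0) (st.1.getD col 0)),
       st.2.set r (Int.xor (st.2.getD r 0) (st.2.getD col 0)))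
    else st) st

-- outer `for col in range(n)`; `none` = the RuntimeError("matrix not invertible") path
def loopA (n col : Nat) (st : List Int × List Int) : Option (List Int × List Int) :=
  if _h : col < n then
    match pivotSearchA st.1 n col col with
    | none => none
    | some p =>
      loopA n (col + 1)
        (elimRowsA n col (if p ≠ col then (swapIdx st.1 col p, swapIdx st.2 col p) else st))
  else some st
termination_by n - col
decreasing_by omega

def gf2_invert (rows : List Int) : List Int :=
  let n := rows.length
  match loopA n 0 (rows, (List.range n).map (fun r => Int.shiftLeft 1 (n - 1 - r))) with
  | some st => st.2
  | none => []   -- Python raises RuntimeError here; such inputs are excluded by Pre_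

-- ===== PORT B =====
-- swap of both tracked lists at i, j
def swapStB (st : List Int × List Int) (i j : Nat) : List Int × List Int :=
  ((st.1.set i (st.1.getD j 0)).set j (st.1.getD i 0),
   (st.2.set i (st.2.getD j 0)).set j (st.2.getD i 0))

-- `for r in range(col+1, n): if bit: ...` — xor the pivot row only into rows BELOW it
def elimBelowB (n col : Nat) (st : List Int × List Int) : List Int × List Int :=
  (List.range' (col + 1) (n - (col + 1))).foldl (fun st r =>
    if pvBit (st.1.getD r 0) (n - 1 - col) = 1 then
      (st.1.set r (Int.xor (st.1.getD r 0) (st.1.getD col 0)),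
       st.2.set r (Int.xor (st.2.getD r 0) (st.2.getD col 0)))
    else st) st

-- forward pass: first row at/below the diagonal with the column bit set becomes the pivot
def forwardB (n col : Nat) (st : List Int × List Int) : Option (List Int × List Int) :=
  if _h : col < n then
    match (List.range' col (n - col)).find?
        (fun r => pvBit (st.1.getD r 0) (n - 1 - col) == 1) with
    | none => none
    | some p =>
      forwardB n (col + 1) (elimBelowB n col (if p ≠ col then swapStB st col p else st))
  else some st
termination_by n - col
decreasing_by omega

-- `for r in range(col): if bit: ...` — xor the pivot row into the rows ABOVE it
def elimAboveB (n col : Nat) (st : List Int × List Int) : List Int × List Int :=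
  (List.range col).foldl (fun st r =>
    if pvBit (st.1.getD r 0) (n - 1 - col) = 1 then
      (st.1.set r (Int.xor (st.1.getD r 0) (st.1.getD col 0)),
       st.2.set r (Int.xor (st.2.getD r 0) (st.2.getD col 0)))
    else st) st

-- back-substitution: `for col in range(n-1, -1, -1)` (k = number of columns still to clear)
def backB (n : Nat) : Nat → List Int × List Int → List Int × List Int
  | 0, st => st
  | (c + 1), st => backB n c (elimAboveB n c st)

def gf2_invert_alt (rows : List Int) : List Int :=
  let n := rows.length
  match forwardB n 0 (rows, (List.range n).map (fun r => Int.shiftLeft 1 (n - 1 - r))) with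
  | some st => (backB n n st).2
  | none => []   -- matrix not invertible: RuntimeError in Python B as well

-- ===== PRECONDITION & SPEC =====
-- low n bits of a row, as Python's x % 2**n (two's complement low bits, exact for negatives)
def pvMask (n : Nat) (x : Int) : Nat := (x.emod ((2 : Int) ^ n)).toNat

-- reduce v against an XOR basis indexed by leading bit; none = v is in the span
def pvInsertBasis (b : List Nat) (v : Nat) : Nat → Option (List Nat)
  | 0 => none
  | (i + 1) =>
    if v.testBit i then
      if b.getD i 0 = 0 then some (b.set i v)
      else pvInsertBasis b (v ^^^ b.getD i 0) i
    else pvInsertBasis b v i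

-- Pre_: the rows, read as n-bit vectors over GF(2), are linearly independent (i.e. the matrix
-- is invertible) — exactly the inputs on which A returns instead of raising RuntimeError.
def Pre_gf2_invert (rows : List Int) : Prop :=
  (rows.foldl
    (fun ob x => ob.bind (fun b => pvInsertBasis b (pvMask rows.length x) rows.length))
    (some (List.replicate rows.length 0))).isSome = true
instance (rows : List Int) : Decidable (Pre_gf2_invert rows) := by
  unfold Pre_gf2_invert; infer_instance

def pvWitness_gf2_invert : List Int := [2, 1]

def Spec_gf2_invert (rows : List Int) (out : List Int) : Prop := out = gf2_invert_alt rows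
instance (rows : List Int) (out : List Int) : Decidable (Spec_gf2_invert rows out) := by
  unfold Spec_gf2_invert; infer_instance

-- ===== CLAIM (what is proved, stated in full; the proofs are below) =====
def Claim_equal_gf2_invert : Prop :=
  ∀ (rows : List Int), Dom_gf2_invert rows → Pre_gf2_invert rows →
    Spec_gf2_invert rows (gf2_invert rows)

-- ===== LEMMAS AND PROOFS =====

-- The whole development proves the stronger, unconditional fact `gf2_invert rows = gf2_invert_alt rows`:
-- the two forward phases keep all rows at or below the current column identical (hence find the
-- same pivots and fail together), each algorithm maintains `matOf I * M = matOf A` over GF(2),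
-- and each ends with `matOf A = 1`, so both outputs encode the unique left inverse of M.

-- 1. basics
lemma getD_set_self (xs : List Int) (i : Nat) (v : Int) (h : i < xs.length) :
    (xs.set i v).getD i 0 = v := by
  simp [List.getD, List.getElem?_set_self, h]

lemma getD_set_ne (xs : List Int) (i j : Nat) (v : Int) (h : j ≠ i) :
    (xs.set i v).getD j 0 = xs.getD j 0 := by
  simp [List.getD, List.getElem?_set_ne (Ne.symm h)]

def bz (x : Int) (k : Nat) : ZMod 2 := if x.testBit k then 1 else 0

lemma nat_land_one (m : Nat) : m &&& 1 = if m.testBit 0 then 1 else 0 := by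
  rw [Nat.and_one_is_mod]
  rcases Nat.mod_two_eq_zero_or_one m with h | h <;> simp [Nat.testBit_zero, h]

lemma ldiff_one (a : Nat) : Nat.ldiff 1 a = if a.testBit 0 then 0 else 1 := by
  apply Nat.eq_of_testBit_eq
  intro k
  rw [Nat.testBit_ldiff]
  cases k with
  | zero => by_cases h : a.testBit 0 <;> simp [h]
  | succ k => by_cases h : a.testBit 0 <;> simp [h, Nat.testBit_add_one]

lemma pvBit_eq (x : Int) (k : Nat) : pvBit x k = if x.testBit k then 1 else 0 := by
  cases x with
  | ofNat m =>
      show Int.land (Int.ofNat (m >>> k)) (Int.ofNat 1) = _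
      have : Int.land (Int.ofNat (m >>> k)) (Int.ofNat 1) = Int.ofNat ((m >>> k) &&& 1) := rfl
      rw [this, nat_land_one]
      simp [Int.testBit, Nat.testBit, Nat.and_comm]
  | negSucc m =>
      show Int.land (Int.negSucc (m >>> k)) (Int.ofNat 1) = _
      have : Int.land (Int.negSucc (m >>> k)) (Int.ofNat 1) = Int.ofNat (Nat.ldiff 1 (m >>> k)) := rfl
      rw [this, ldiff_one]
      simp only [Int.testBit]
      rcases Nat.mod_two_eq_zero_or_one (m >>> k) with h | h <;>
        simp [Nat.testBit, Nat.one_and_eq_mod_two, h]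

lemma pvBit_eq_one (x : Int) (k : Nat) : (pvBit x k = 1) ↔ x.testBit k = true := by
  rw [pvBit_eq]; by_cases h : x.testBit k <;> simp [h]

lemma bz_xor (x y : Int) (k : Nat) : bz (Int.xor x y) k = bz x k + bz y k := by
  unfold bz
  rw [Int.testBit_lxor]
  cases hx : x.testBit k <;> cases hy : y.testBit k <;> simp <;> decide

lemma bz_pow2 (i k : Nat) : bz (Int.shiftLeft 1 i) k = if i = k then 1 else 0 := by
  have h1 : Int.shiftLeft 1 i = Int.ofNat (1 <<< i) := rfl
  rw [h1]
  unfold bz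
  have : (Int.ofNat (1 <<< i)).testBit k = (1 <<< i : Nat).testBit k := by simp [Int.testBit]
  rw [this]
  have : (1 <<< i : Nat) = 2 ^ i := by simp [Nat.shiftLeft_eq]
  rw [this, Nat.testBit_two_pow]
  by_cases h : i = k <;> simp [h]

def matOf (n : Nat) (xs : List Int) : Matrix (Fin n) (Fin n) (ZMod 2) :=
  Matrix.of fun r c => bz (xs.getD r.val 0) (n - 1 - c.val)

def StInv (n : Nat) (M : Matrix (Fin n) (Fin n) (ZMod 2)) (st : List Int × List Int) : Prop :=
  st.1.length = n ∧ st.2.length = n ∧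
  (∀ r, r < n → 0 ≤ st.2.getD r 0 ∧ st.2.getD r 0 < 2 ^ n) ∧
  matOf n st.2 * M = matOf n st.1

def UnitCols (n : Nat) (xs : List Int) (m : Nat) : Prop :=
  ∀ c, c < m → ∀ r, r < n → bz (xs.getD r 0) (n - 1 - c) = if r = c then 1 else 0

def UpperTri (n : Nat) (xs : List Int) (m : Nat) : Prop :=
  ∀ c, c < m → bz (xs.getD c 0) (n - 1 - c) = 1 ∧
    ∀ r, c < r → r < n → bz (xs.getD r 0) (n - 1 - c) = 0

-- generic guarded xor-step fold
def xstep (col : Nat) (p : Nat → Int → Bool) (st : List Int × List Int) (r : Nat) :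
    List Int × List Int :=
  if p r (st.1.getD r 0) then
    (st.1.set r (Int.xor (st.1.getD r 0) (st.1.getD col 0)),
     st.2.set r (Int.xor (st.2.getD r 0) (st.2.getD col 0)))
  else st

lemma xfold_spec (col : Nat) (p : Nat → Int → Bool) :
    ∀ (L : List Nat) (As Is : List Int),
    L.Nodup → (∀ r ∈ L, r < As.length) → As.length = Is.length →
    (col ∈ L → ∀ x, p col x = false) →
    (L.foldl (xstep col p) (As, Is)).1.length = As.length ∧
    (L.foldl (xstep col p) (As, Is)).2.length = Is.length ∧
    ∀ j, ((L.foldl (xstep col p) (As, Is)).1.getD j 0 =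
            if j ∈ L ∧ p j (As.getD j 0) then Int.xor (As.getD j 0) (As.getD col 0)
            else As.getD j 0) ∧
         ((L.foldl (xstep col p) (As, Is)).2.getD j 0 =
            if j ∈ L ∧ p j (As.getD j 0) then Int.xor (Is.getD j 0) (Is.getD col 0)
            else Is.getD j 0) := by
  intro L
  induction L with
  | nil => intro As Is _ _ _ _; simp
  | cons a t ih =>
    intro As Is hnd hlen hAI hcol
    have hndt : t.Nodup := (List.nodup_cons.mp hnd).2
    have hat : a ∉ t := (List.nodup_cons.mp hnd).1
    have hcol' : col ∈ t → ∀ x, p col x = false := fun h => hcol (List.mem_cons_of_mem _ h)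
    by_cases hpa : p a (As.getD a 0) = true
    · -- the step at a fires; a ≠ col
      have hane : a ≠ col := by
        intro h; subst h
        have := hcol (List.mem_cons_self ..) (As.getD a 0)
        rw [this] at hpa; exact Bool.false_ne_true hpa
      have ha : a < As.length := hlen a (List.mem_cons_self ..)
      have ha2 : a < Is.length := hAI ▸ ha
      have hx : xstep col p (As, Is) a =
          (As.set a (Int.xor (As.getD a 0) (As.getD col 0)),
           Is.set a (Int.xor (Is.getD a 0) (Is.getD col 0))) := by
        dsimp only [xstep]; rw [if_pos hpa]
      set As' := As.set a (Int.xor (As.getD a 0) (As.getD col 0)) with hAs'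
      set Is' := Is.set a (Int.xor (Is.getD a 0) (Is.getD col 0)) with hIs'
      have hstep : (a :: t).foldl (xstep col p) (As, Is) = t.foldl (xstep col p) (As', Is') := by
        rw [List.foldl_cons, hx]
      have hlen' : ∀ r ∈ t, r < As'.length := by
        intro r hr; rw [hAs', List.length_set]; exact hlen r (List.mem_cons_of_mem _ hr)
      have hAI' : As'.length = Is'.length := by simp [hAs', hIs', hAI]
      obtain ⟨l1, l2, hj⟩ := ih As' Is' hndt hlen' hAI' hcol'
      rw [hstep]
      refine ⟨by rw [l1, hAs', List.length_set], by rw [l2, hIs', List.length_set], ?_⟩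
      intro j
      have hcolA : As'.getD col 0 = As.getD col 0 := getD_set_ne _ _ _ _ (Ne.symm hane)
      have hcolI : Is'.getD col 0 = Is.getD col 0 := getD_set_ne _ _ _ _ (Ne.symm hane)
      by_cases hja : j = a
      · subst hja
        have e1 := (hj j).1; have e2 := (hj j).2
        rw [if_neg (by intro hc; exact hat hc.1)] at e1
        rw [if_neg (by intro hc; exact hat hc.1)] at e2
        refine ⟨?_, ?_⟩
        · rw [e1, if_pos ⟨List.mem_cons_self .., hpa⟩, getD_set_self _ _ _ ha]
        · rw [e2, if_pos ⟨List.mem_cons_self .., hpa⟩, getD_set_self _ _ _ ha2]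
      · have eA : As'.getD j 0 = As.getD j 0 := getD_set_ne _ _ _ _ hja
        have eI : Is'.getD j 0 = Is.getD j 0 := getD_set_ne _ _ _ _ hja
        have e1 := (hj j).1; have e2 := (hj j).2
        simp only [eA, hcolA] at e1
        simp only [eA, eI, hcolI] at e2
        have hmem : (j ∈ t ∧ p j (As.getD j 0) = true) ↔ (j ∈ a :: t ∧ p j (As.getD j 0) = true) := by
          simp [List.mem_cons, hja]
        constructor
        · rw [e1]; by_cases hc : j ∈ a :: t ∧ p j (As.getD j 0) = true
          · rw [if_pos (hmem.mpr hc), if_pos hc]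
          · rw [if_neg (fun h => hc (hmem.mp h)), if_neg hc]
        · rw [e2]; by_cases hc : j ∈ a :: t ∧ p j (As.getD j 0) = true
          · rw [if_pos (hmem.mpr hc), if_pos hc]
          · rw [if_neg (fun h => hc (hmem.mp h)), if_neg hc]
    · -- step at a is the identity
      have hx : xstep col p (As, Is) a = (As, Is) := by
        dsimp only [xstep]; rw [if_neg hpa]
      have hstep : (a :: t).foldl (xstep col p) (As, Is) = t.foldl (xstep col p) (As, Is) := by
        rw [List.foldl_cons, hx]
      obtain ⟨l1, l2, hj⟩ := ih As Is hndt
        (fun r hr => hlen r (List.mem_cons_of_mem _ hr)) hAI hcol'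
      rw [hstep]
      refine ⟨l1, l2, ?_⟩
      intro j
      have e1 := (hj j).1; have e2 := (hj j).2
      have hmem : (j ∈ t ∧ p j (As.getD j 0) = true) ↔ (j ∈ a :: t ∧ p j (As.getD j 0) = true) := by
        constructor
        · exact fun h => ⟨List.mem_cons_of_mem _ h.1, h.2⟩
        · rintro ⟨hm, hp⟩
          rcases List.mem_cons.mp hm with h | h
          · subst h; exact absurd hp hpa
          · exact ⟨h, hp⟩
      constructor
      · rw [e1]; by_cases hc : j ∈ a :: t ∧ p j (As.getD j 0) = true
        · rw [if_pos (hmem.mpr hc), if_pos hc]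
        · rw [if_neg (fun h => hc (hmem.mp h)), if_neg hc]
      · rw [e2]; by_cases hc : j ∈ a :: t ∧ p j (As.getD j 0) = true
        · rw [if_pos (hmem.mpr hc), if_pos hc]
        · rw [if_neg (fun h => hc (hmem.mp h)), if_neg hc]


-- 2. matrix algebra over GF(2)
lemma rowAdd_mul {n : Nat} (X M : Matrix (Fin n) (Fin n) (ZMod 2)) (c : Fin n)
    (q : Fin n → Prop) [DecidablePred q] :
    (Matrix.of fun r k => if q r then X r k + X c k else X r k) * M =
    Matrix.of fun r k => if q r then (X * M) r k + (X * M) c k else (X * M) r k := by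
  ext r k
  by_cases h : q r <;> simp [Matrix.mul_apply, h, add_mul, Finset.sum_add_distrib]

lemma perm_mul {n : Nat} (X M : Matrix (Fin n) (Fin n) (ZMod 2)) (σ : Fin n → Fin n) :
    (Matrix.of fun r k => X (σ r) k) * M = Matrix.of fun r k => (X * M) (σ r) k := by
  ext r k; simp [Matrix.mul_apply]

-- 3. swap facts
lemma swapIdx_length (xs : List Int) (i j : Nat) : (swapIdx xs i j).length = xs.length := by
  simp [swapIdx]

lemma swapIdx_getD (xs : List Int) (i j k : Nat) (hi : i < xs.length) (hj : j < xs.length) :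
    (swapIdx xs i j).getD k 0 =
      if k = j then xs.getD i 0 else if k = i then xs.getD j 0 else xs.getD k 0 := by
  unfold swapIdx
  by_cases hkj : k = j
  · subst hkj; rw [if_pos rfl, getD_set_self _ _ _ (by simpa using hj)]
  · rw [if_neg hkj, getD_set_ne _ _ _ _ hkj]
    by_cases hki : k = i
    · subst hki; rw [if_pos rfl, getD_set_self _ _ _ hi]
    · rw [if_neg hki, getD_set_ne _ _ _ _ hki]

-- 4. zip the three elimination folds with the generic xstep fold
lemma elimRowsA_eq (n col : Nat) (st : List Int × List Int) :
    elimRowsA n col st =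
      (List.range n).foldl
        (xstep col (fun r x => decide (r ≠ col ∧ pvBit x (n - 1 - col) = 1))) st := by
  unfold elimRowsA
  congr 1
  funext st r
  dsimp only [xstep]
  by_cases h : r ≠ col ∧ pvBit (st.1.getD r 0) (n - 1 - col) = 1
  · rw [if_pos h, if_pos (decide_eq_true h)]
  · rw [if_neg h, if_neg (by simpa using h)]

lemma elimBelowB_eq (n col : Nat) (st : List Int × List Int) :
    elimBelowB n col st =
      (List.range' (col + 1) (n - (col + 1))).foldl
        (xstep col (fun _ x => decide (pvBit x (n - 1 - col) = 1))) st := by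
  unfold elimBelowB
  congr 1
  funext st r
  dsimp only [xstep]
  by_cases h : pvBit (st.1.getD r 0) (n - 1 - col) = 1
  · rw [if_pos h, if_pos (decide_eq_true h)]
  · rw [if_neg h, if_neg (by simpa using h)]

lemma elimAboveB_eq (n col : Nat) (st : List Int × List Int) :
    elimAboveB n col st =
      (List.range col).foldl
        (xstep col (fun _ x => decide (pvBit x (n - 1 - col) = 1))) st := by
  unfold elimAboveB
  congr 1
  funext st r
  dsimp only [xstep]
  by_cases h : pvBit (st.1.getD r 0) (n - 1 - col) = 1
  · rw [if_pos h, if_pos (decide_eq_true h)]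
  · rw [if_neg h, if_neg (by simpa using h)]

-- pointwise descriptions of the three eliminations
lemma elimRowsA_spec (n col : Nat) (st : List Int × List Int)
    (h1 : st.1.length = n) (h2 : st.2.length = n) :
    (elimRowsA n col st).1.length = n ∧ (elimRowsA n col st).2.length = n ∧
    ∀ j, ((elimRowsA n col st).1.getD j 0 =
            if j < n ∧ j ≠ col ∧ (st.1.getD j 0).testBit (n - 1 - col)
            then Int.xor (st.1.getD j 0) (st.1.getD col 0) else st.1.getD j 0) ∧
        ((elimRowsA n col st).2.getD j 0 =
            if j < n ∧ j ≠ col ∧ (st.1.getD j 0).testBit (n - 1 - col)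
            then Int.xor (st.2.getD j 0) (st.2.getD col 0) else st.2.getD j 0) := by
  rw [elimRowsA_eq]
  obtain ⟨l1, l2, hj⟩ := xfold_spec col (fun r x => decide (r ≠ col ∧ pvBit x (n - 1 - col) = 1))
    (List.range n) st.1 st.2 (List.nodup_range)
    (fun r hr => h1 ▸ List.mem_range.mp hr) (h1.trans h2.symm)
    (fun _ x => by simp)
  refine ⟨h1 ▸ l1, h2 ▸ l2, ?_⟩
  intro j
  have hcond : (j ∈ List.range n ∧
      (decide (j ≠ col ∧ pvBit (st.1.getD j 0) (n - 1 - col) = 1)) = true) ↔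
      (j < n ∧ j ≠ col ∧ (st.1.getD j 0).testBit (n - 1 - col)) := by
    simp [List.mem_range, pvBit_eq_one, and_assoc]
  constructor
  · rw [(hj j).1]; by_cases hc : j < n ∧ j ≠ col ∧ (st.1.getD j 0).testBit (n - 1 - col)
    · rw [if_pos (hcond.mpr hc), if_pos hc]
    · rw [if_neg (fun h => hc (hcond.mp h)), if_neg hc]
  · rw [(hj j).2]; by_cases hc : j < n ∧ j ≠ col ∧ (st.1.getD j 0).testBit (n - 1 - col)
    · rw [if_pos (hcond.mpr hc), if_pos hc]
    · rw [if_neg (fun h => hc (hcond.mp h)), if_neg hc]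

lemma elimBelowB_spec (n col : Nat) (st : List Int × List Int) (hcn : col < n)
    (h1 : st.1.length = n) (h2 : st.2.length = n) :
    (elimBelowB n col st).1.length = n ∧ (elimBelowB n col st).2.length = n ∧
    ∀ j, ((elimBelowB n col st).1.getD j 0 =
            if j < n ∧ col < j ∧ (st.1.getD j 0).testBit (n - 1 - col)
            then Int.xor (st.1.getD j 0) (st.1.getD col 0) else st.1.getD j 0) ∧
        ((elimBelowB n col st).2.getD j 0 =
            if j < n ∧ col < j ∧ (st.1.getD j 0).testBit (n - 1 - col)
            then Int.xor (st.2.getD j 0) (st.2.getD col 0) else st.2.getD j 0) := by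
  rw [elimBelowB_eq]
  obtain ⟨l1, l2, hj⟩ := xfold_spec col (fun _ x => decide (pvBit x (n - 1 - col) = 1))
    (List.range' (col + 1) (n - (col + 1))) st.1 st.2 (List.nodup_range')
    (fun r hr => by have := List.mem_range'_1.mp hr; omega)
    (h1.trans h2.symm)
    (fun hmem _ => by have := List.mem_range'_1.mp hmem; omega)
  refine ⟨h1 ▸ l1, h2 ▸ l2, ?_⟩
  intro j
  have hcond : (j ∈ List.range' (col + 1) (n - (col + 1)) ∧
      (decide (pvBit (st.1.getD j 0) (n - 1 - col) = 1)) = true) ↔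
      (j < n ∧ col < j ∧ (st.1.getD j 0).testBit (n - 1 - col)) := by
    rw [List.mem_range'_1]
    simp only [decide_eq_true_eq, pvBit_eq_one]
    constructor
    · rintro ⟨⟨hm1, hm2⟩, hb⟩; exact ⟨by omega, by omega, hb⟩
    · rintro ⟨hm1, hm2, hb⟩; exact ⟨⟨by omega, by omega⟩, hb⟩
  constructor
  · rw [(hj j).1]; by_cases hc : j < n ∧ col < j ∧ (st.1.getD j 0).testBit (n - 1 - col)
    · rw [if_pos (hcond.mpr hc), if_pos hc]
    · rw [if_neg (fun h => hc (hcond.mp h)), if_neg hc]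
  · rw [(hj j).2]; by_cases hc : j < n ∧ col < j ∧ (st.1.getD j 0).testBit (n - 1 - col)
    · rw [if_pos (hcond.mpr hc), if_pos hc]
    · rw [if_neg (fun h => hc (hcond.mp h)), if_neg hc]

lemma elimAboveB_spec (n col : Nat) (st : List Int × List Int) (hcn : col < n)
    (h1 : st.1.length = n) (h2 : st.2.length = n) :
    (elimAboveB n col st).1.length = n ∧ (elimAboveB n col st).2.length = n ∧
    ∀ j, ((elimAboveB n col st).1.getD j 0 =
            if j < col ∧ (st.1.getD j 0).testBit (n - 1 - col)
            then Int.xor (st.1.getD j 0) (st.1.getD col 0) else st.1.getD j 0) ∧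
        ((elimAboveB n col st).2.getD j 0 =
            if j < col ∧ (st.1.getD j 0).testBit (n - 1 - col)
            then Int.xor (st.2.getD j 0) (st.2.getD col 0) else st.2.getD j 0) := by
  rw [elimAboveB_eq]
  obtain ⟨l1, l2, hj⟩ := xfold_spec col (fun _ x => decide (pvBit x (n - 1 - col) = 1))
    (List.range col) st.1 st.2 (List.nodup_range)
    (fun r hr => by have := List.mem_range.mp hr; omega)
    (h1.trans h2.symm)
    (fun hmem _ => by have := List.mem_range.mp hmem; omega)
  refine ⟨h1 ▸ l1, h2 ▸ l2, ?_⟩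
  intro j
  have hcond : (j ∈ List.range col ∧
      (decide (pvBit (st.1.getD j 0) (n - 1 - col) = 1)) = true) ↔
      (j < col ∧ (st.1.getD j 0).testBit (n - 1 - col)) := by
    simp [List.mem_range, pvBit_eq_one]
  constructor
  · rw [(hj j).1]; by_cases hc : j < col ∧ (st.1.getD j 0).testBit (n - 1 - col)
    · rw [if_pos (hcond.mpr hc), if_pos hc]
    · rw [if_neg (fun h => hc (hcond.mp h)), if_neg hc]
  · rw [(hj j).2]; by_cases hc : j < col ∧ (st.1.getD j 0).testBit (n - 1 - col)
    · rw [if_pos (hcond.mpr hc), if_pos hc]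
    · rw [if_neg (fun h => hc (hcond.mp h)), if_neg hc]

-- 5. StInv preservation
lemma bz_true {x : Int} {k : Nat} (h : x.testBit k = true) : bz x k = 1 := by simp [bz, h]
lemma bz_false {x : Int} {k : Nat} (h : x.testBit k = false) : bz x k = 0 := by simp [bz, h]

lemma int_xor_bound (n : Nat) (x y : Int) (hx0 : 0 ≤ x) (hx : x < 2 ^ n)
    (hy0 : 0 ≤ y) (hy : y < 2 ^ n) : 0 ≤ Int.xor x y ∧ Int.xor x y < 2 ^ n := by
  obtain ⟨a, rfl⟩ := Int.eq_ofNat_of_zero_le hx0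
  obtain ⟨b, rfl⟩ := Int.eq_ofNat_of_zero_le hy0
  have hx' : a < 2 ^ n := by exact_mod_cast hx
  have hy' : b < 2 ^ n := by exact_mod_cast hy
  have e : Int.xor (a : Int) (b : Int) = ((a ^^^ b : Nat) : Int) := rfl
  rw [e]
  constructor
  · exact Int.ofNat_nonneg _
  · exact_mod_cast Nat.xor_lt_two_pow hx' hy'

lemma StInv_elim {n : Nat} (M : Matrix (Fin n) (Fin n) (ZMod 2))
    (st st' : List Int × List Int) (col : Nat) (hcol : col < n)
    (hInv : StInv n M st) (cond : Nat → Prop) [DecidablePred cond]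
    (l1 : st'.1.length = n) (l2 : st'.2.length = n)
    (hA : ∀ j, j < n → st'.1.getD j 0 =
        if cond j then Int.xor (st.1.getD j 0) (st.1.getD col 0) else st.1.getD j 0)
    (hI : ∀ j, j < n → st'.2.getD j 0 =
        if cond j then Int.xor (st.2.getD j 0) (st.2.getD col 0) else st.2.getD j 0) :
    StInv n M st' := by
  obtain ⟨k1, k2, hb, hm⟩ := hInv
  refine ⟨l1, l2, ?_, ?_⟩
  · intro r hr
    rw [hI r hr]
    by_cases h : cond r
    · rw [if_pos h]
      exact int_xor_bound n _ _ (hb r hr).1 (hb r hr).2 (hb col hcol).1 (hb col hcol).2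
    · rw [if_neg h]; exact hb r hr
  · have eA : matOf n st'.1 = Matrix.of fun r k =>
        if cond r.val then (matOf n st.1) r k + (matOf n st.1) ⟨col, hcol⟩ k
        else (matOf n st.1) r k := by
      ext r k
      show bz (st'.1.getD r.val 0) (n - 1 - k.val) = _
      rw [hA r.val r.isLt]
      by_cases h : cond r.val
      · rw [if_pos h]; simp only [Matrix.of_apply, if_pos h]; exact bz_xor _ _ _
      · rw [if_neg h]; simp only [Matrix.of_apply, if_neg h]; rfl
    have eI : matOf n st'.2 = Matrix.of fun r k =>
        if cond r.val then (matOf n st.2) r k + (matOf n st.2) ⟨col, hcol⟩ k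
        else (matOf n st.2) r k := by
      ext r k
      show bz (st'.2.getD r.val 0) (n - 1 - k.val) = _
      rw [hI r.val r.isLt]
      by_cases h : cond r.val
      · rw [if_pos h]; simp only [Matrix.of_apply, if_pos h]; exact bz_xor _ _ _
      · rw [if_neg h]; simp only [Matrix.of_apply, if_neg h]; rfl
    rw [eA, eI, rowAdd_mul, hm]

lemma StInv_swap {n : Nat} (M : Matrix (Fin n) (Fin n) (ZMod 2))
    (st : List Int × List Int) (col p : Nat) (hc : col < n) (hp : p < n)
    (hInv : StInv n M st) : StInv n M (swapIdx st.1 col p, swapIdx st.2 col p) := by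
  obtain ⟨k1, k2, hb, hm⟩ := hInv
  have hc1 : col < st.1.length := k1 ▸ hc
  have hp1 : p < st.1.length := k1 ▸ hp
  have hc2 : col < st.2.length := k2 ▸ hc
  have hp2 : p < st.2.length := k2 ▸ hp
  set σ : Fin n → Fin n := fun r => if r.val = p then ⟨col, hc⟩ else if r.val = col then ⟨p, hp⟩ else r with hσ
  have eA : matOf n (swapIdx st.1 col p) = Matrix.of fun r k => matOf n st.1 (σ r) k := by
    ext r k
    show bz ((swapIdx st.1 col p).getD r.val 0) (n - 1 - k.val) = _
    rw [swapIdx_getD _ _ _ _ hc1 hp1, hσ]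
    by_cases h1 : (r : Nat) = p
    · simp [matOf, h1]
    · by_cases h2 : (r : Nat) = col
      · by_cases h3 : col = p <;> simp [matOf, h1, h2, h3]
      · simp [matOf, h1, h2]
  have eI : matOf n (swapIdx st.2 col p) = Matrix.of fun r k => matOf n st.2 (σ r) k := by
    ext r k
    show bz ((swapIdx st.2 col p).getD r.val 0) (n - 1 - k.val) = _
    rw [swapIdx_getD _ _ _ _ hc2 hp2, hσ]
    by_cases h1 : (r : Nat) = p
    · simp [matOf, h1]
    · by_cases h2 : (r : Nat) = col
      · by_cases h3 : col = p <;> simp [matOf, h1, h2, h3]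
      · simp [matOf, h1, h2]
  refine ⟨by simpa [swapIdx_length] using k1, by simpa [swapIdx_length] using k2, ?_, ?_⟩
  · intro r hr
    rw [swapIdx_getD _ _ _ _ hc2 hp2]
    by_cases h1 : r = p
    · rw [if_pos h1]; exact hb col hc
    · rw [if_neg h1]; by_cases h2 : r = col
      · rw [if_pos h2]; exact hb p hp
      · rw [if_neg h2]; exact hb r hr
  · show matOf n (swapIdx st.2 col p) * M = matOf n (swapIdx st.1 col p)
    rw [eA, eI, perm_mul, hm]

-- 6. structural invariants through one column step
lemma UnitCols_swap (n col p : Nat) (xs : List Int) (hcol : col < n) (hcp : col ≤ p)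
    (hpn : p < n) (hlen : xs.length = n) (hU : UnitCols n xs col) :
    UnitCols n (swapIdx xs col p) col := by
  intro c hc r hr
  rw [swapIdx_getD _ _ _ _ (hlen ▸ hcol) (hlen ▸ hpn)]
  by_cases h1 : r = p
  · rw [if_pos h1]
    have := hU c hc col hcol
    rw [this, if_neg (show ¬ col = c by omega), if_neg (show ¬ r = c by omega)]
  · rw [if_neg h1]
    by_cases h2 : r = col
    · rw [if_pos h2]
      have := hU c hc p hpn
      rw [this, if_neg (show ¬ p = c by omega), if_neg (show ¬ r = c by omega)]
    · rw [if_neg h2]; exact hU c hc r hr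

lemma UpperTri_swap (n col p : Nat) (xs : List Int) (hcol : col < n) (hcp : col ≤ p)
    (hpn : p < n) (hlen : xs.length = n) (hT : UpperTri n xs col) :
    UpperTri n (swapIdx xs col p) col := by
  intro c hc
  constructor
  · rw [swapIdx_getD _ _ _ _ (hlen ▸ hcol) (hlen ▸ hpn),
      if_neg (by omega), if_neg (by omega)]
    exact (hT c hc).1
  · intro r hrc hrn
    rw [swapIdx_getD _ _ _ _ (hlen ▸ hcol) (hlen ▸ hpn)]
    by_cases h1 : r = p
    · rw [if_pos h1]; exact (hT c hc).2 col (by omega) hcol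
    · rw [if_neg h1]
      by_cases h2 : r = col
      · rw [if_pos h2]; exact (hT c hc).2 p (by omega) hpn
      · rw [if_neg h2]; exact (hT c hc).2 r hrc hrn

lemma two_eq_zero : (1 : ZMod 2) + 1 = 0 := by decide

lemma stepA_unit (n col : Nat) (st : List Int × List Int) (hcol : col < n)
    (h1 : st.1.length = n) (h2 : st.2.length = n) (hU : UnitCols n st.1 col)
    (hpiv : (st.1.getD col 0).testBit (n - 1 - col) = true) :
    UnitCols n (elimRowsA n col st).1 (col + 1) := by
  obtain ⟨-, -, hj⟩ := elimRowsA_spec n col st h1 h2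
  intro c hc r hr
  rw [(hj r).1]
  by_cases hcc : c = col
  · subst hcc
    by_cases hrc : r = c
    · subst hrc
      rw [if_neg (by rintro ⟨-, h, -⟩; exact h rfl)]
      rw [if_pos rfl]
      exact bz_true hpiv
    · by_cases hb : (st.1.getD r 0).testBit (n - 1 - c) = true
      · rw [if_pos ⟨hr, hrc, hb⟩, bz_xor, bz_true hb, bz_true hpiv, if_neg hrc]
        exact two_eq_zero
      · rw [if_neg (by rintro ⟨-, -, h⟩; exact hb h), if_neg hrc]
        exact bz_false (by simpa using hb)
  · have hc' : c < col := by omega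
    by_cases hcnd : r < n ∧ r ≠ col ∧ (st.1.getD r 0).testBit (n - 1 - col)
    · rw [if_pos hcnd, bz_xor, hU c hc' r hr, hU c hc' col hcol,
        if_neg (show ¬ col = c by omega)]
      by_cases hrc : r = c <;> simp [hrc]
    · rw [if_neg hcnd]; exact hU c hc' r hr

lemma stepB_tri (n col : Nat) (st : List Int × List Int) (hcol : col < n)
    (h1 : st.1.length = n) (h2 : st.2.length = n) (hT : UpperTri n st.1 col)
    (hpiv : (st.1.getD col 0).testBit (n - 1 - col) = true) :
    UpperTri n (elimBelowB n col st).1 (col + 1) := by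
  obtain ⟨-, -, hj⟩ := elimBelowB_spec n col st hcol h1 h2
  intro c hc
  constructor
  · rw [(hj c).1]
    by_cases hcc : c = col
    · subst hcc
      rw [if_neg (by rintro ⟨-, h, -⟩; omega)]
      exact bz_true hpiv
    · have hc' : c < col := by omega
      rw [if_neg (by rintro ⟨-, h, -⟩; omega)]
      exact (hT c hc').1
  · intro r hrc hrn
    rw [(hj r).1]
    by_cases hcc : c = col
    · subst hcc
      by_cases hb : (st.1.getD r 0).testBit (n - 1 - c) = true
      · rw [if_pos ⟨hrn, hrc, hb⟩, bz_xor, bz_true hb, bz_true hpiv]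
        exact two_eq_zero
      · rw [if_neg (by rintro ⟨-, -, h⟩; exact hb h)]
        exact bz_false (by simpa using hb)
    · have hc' : c < col := by omega
      by_cases hcnd : r < n ∧ col < r ∧ (st.1.getD r 0).testBit (n - 1 - col)
      · rw [if_pos hcnd, bz_xor, (hT c hc').2 r hrc hrn,
          (hT c hc').2 col (by omega) hcol]
        simp
      · rw [if_neg hcnd]; exact (hT c hc').2 r hrc hrn

-- 7. the two pivot searches agree
lemma find?_congr' {α : Type} : ∀ (L : List α) (f g : α → Bool),
    (∀ x ∈ L, f x = g x) → L.find? f = L.find? g := by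
  intro L
  induction L with
  | nil => intro f g _; rfl
  | cons a t ih =>
    intro f g h
    have ha := h a (List.mem_cons_self ..)
    rw [List.find?_cons, List.find?_cons, ha]
    cases hga : g a
    · exact ih f g (fun x hx => h x (List.mem_cons_of_mem _ hx))
    · rfl

lemma pivotSearchA_eq (As : List Int) (n col : Nat) :
    ∀ k r, k = n - r → pivotSearchA As n col r =
      (List.range' r (n - r)).find? (fun j => pvBit (As.getD j 0) (n - 1 - col) == 1) := by
  intro k
  induction k with
  | zero =>
    intro r h
    have hr : ¬ r < n := by omega
    rw [pivotSearchA, dif_neg hr]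
    have : n - r = 0 := by omega
    rw [this]
    rfl
  | succ k ih =>
    intro r h
    have hr : r < n := by omega
    rw [pivotSearchA, dif_pos hr]
    have hnr : n - r = (n - (r + 1)) + 1 := by omega
    rw [hnr, List.range'_succ, List.find?_cons]
    by_cases hb : pvBit (As.getD r 0) (n - 1 - col) = 1
    · rw [if_pos hb]
      have : (pvBit (As.getD r 0) (n - 1 - col) == 1) = true := by simpa using hb
      rw [this]
    · rw [if_neg hb]
      have : (pvBit (As.getD r 0) (n - 1 - col) == 1) = false := by simpa using hb
      rw [this]
      exact ih (r + 1) (by omega)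

lemma pivot_props (Bs : List Int) (n col p : Nat) (hcol : col < n)
    (h : (List.range' col (n - col)).find?
      (fun j => pvBit (Bs.getD j 0) (n - 1 - col) == 1) = some p) :
    col ≤ p ∧ p < n ∧ (Bs.getD p 0).testBit (n - 1 - col) = true := by
  have hmem := List.mem_of_find?_eq_some h
  have hp := List.find?_some h
  have hb : (Bs.getD p 0).testBit (n - 1 - col) = true := by
    rw [← pvBit_eq_one]; simpa using hp
  have := List.mem_range'_1.mp hmem
  exact ⟨by omega, by omega, hb⟩

-- 8. joint forward phase: same pivots, same failures, both invariants
lemma swapStB_eq (st : List Int × List Int) (i j : Nat) :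
    swapStB st i j = (swapIdx st.1 i j, swapIdx st.2 i j) := rfl

lemma forward_joint (n : Nat) (M : Matrix (Fin n) (Fin n) (ZMod 2)) :
    ∀ fuel col stA stB, fuel = n - col → col ≤ n →
    StInv n M stA → StInv n M stB →
    UnitCols n stA.1 col → UpperTri n stB.1 col →
    (∀ r, col ≤ r → r < n →
      stA.1.getD r 0 = stB.1.getD r 0 ∧ stA.2.getD r 0 = stB.2.getD r 0) →
    (loopA n col stA = none ∧ forwardB n col stB = none) ∨
    (∃ stA' stB', loopA n col stA = some stA' ∧ forwardB n col stB = some stB' ∧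
      StInv n M stA' ∧ StInv n M stB' ∧ UnitCols n stA'.1 n ∧ UpperTri n stB'.1 n) := by
  intro fuel
  induction fuel with
  | zero =>
    intro col stA stB hf hcn hIA hIB hU hT _
    have hcol : col = n := by omega
    subst hcol
    rw [loopA, dif_neg (by omega), forwardB, dif_neg (by omega)]
    exact Or.inr ⟨stA, stB, rfl, rfl, hIA, hIB, hU, hT⟩
  | succ k ih =>
    intro col stA stB hf hcn hIA hIB hU hT hX
    have hcol : col < n := by omega
    rw [loopA, dif_pos hcol, forwardB, dif_pos hcol]
    have hpe : pivotSearchA stA.1 n col col =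
        (List.range' col (n - col)).find?
          (fun j => pvBit (stB.1.getD j 0) (n - 1 - col) == 1) := by
      rw [pivotSearchA_eq stA.1 n col (n - col) col rfl]
      apply find?_congr'
      intro x hx
      have hxb := List.mem_range'_1.mp hx
      rw [(hX x (by omega) (by omega)).1]
    cases hp : (List.range' col (n - col)).find?
        (fun j => pvBit (stB.1.getD j 0) (n - 1 - col) == 1) with
    | none => rw [hpe, hp]; exact Or.inl ⟨rfl, rfl⟩
    | some p =>
      rw [hpe, hp]
      obtain ⟨hclep, hpn, hbitB⟩ := pivot_props stB.1 n col p hcol hp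
      have hbitA : (stA.1.getD p 0).testBit (n - 1 - col) = true := by
        rw [(hX p hclep hpn).1]; exact hbitB
      -- the post-swap states
      set stA1 := if p ≠ col then (swapIdx stA.1 col p, swapIdx stA.2 col p) else stA with hA1
      set stB1 := if p ≠ col then swapStB stB col p else stB with hB1
      have hIA1 : StInv n M stA1 := by
        rw [hA1]; by_cases hpc : p ≠ col
        · rw [if_pos hpc]; exact StInv_swap M stA col p hcol hpn hIA
        · rw [if_neg hpc]; exact hIA
      have hIB1 : StInv n M stB1 := by
        rw [hB1]; by_cases hpc : p ≠ col
        · rw [if_pos hpc, swapStB_eq]; exact StInv_swap M stB col p hcol hpn hIB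
        · rw [if_neg hpc]; exact hIB
      have hU1 : UnitCols n stA1.1 col := by
        rw [hA1]; by_cases hpc : p ≠ col
        · rw [if_pos hpc]; exact UnitCols_swap n col p stA.1 hcol hclep hpn hIA.1 hU
        · rw [if_neg hpc]; exact hU
      have hT1 : UpperTri n stB1.1 col := by
        rw [hB1]; by_cases hpc : p ≠ col
        · rw [if_pos hpc, swapStB_eq]
          exact UpperTri_swap n col p stB.1 hcol hclep hpn hIB.1 hT
        · rw [if_neg hpc]; exact hT
      have hX1 : ∀ r, col ≤ r → r < n →
          stA1.1.getD r 0 = stB1.1.getD r 0 ∧ stA1.2.getD r 0 = stB1.2.getD r 0 := by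
        intro r hr1 hr2
        rw [hA1, hB1]
        by_cases hpc : p ≠ col
        · rw [if_pos hpc, if_pos hpc, swapStB_eq]
          dsimp only
          rw [swapIdx_getD _ _ _ _ (hIA.1 ▸ hcol) (hIA.1 ▸ hpn),
              swapIdx_getD _ _ _ _ (hIB.1 ▸ hcol) (hIB.1 ▸ hpn),
              swapIdx_getD _ _ _ _ (hIA.2.1 ▸ hcol) (hIA.2.1 ▸ hpn),
              swapIdx_getD _ _ _ _ (hIB.2.1 ▸ hcol) (hIB.2.1 ▸ hpn)]
          by_cases h1 : r = p
          · rw [if_pos h1, if_pos h1, if_pos h1, if_pos h1]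
            exact hX col (le_refl col) hcol
          · rw [if_neg h1, if_neg h1, if_neg h1, if_neg h1]
            by_cases h2 : r = col
            · rw [if_pos h2, if_pos h2, if_pos h2, if_pos h2]
              exact hX p hclep hpn
            · rw [if_neg h2, if_neg h2, if_neg h2, if_neg h2]
              exact hX r hr1 hr2
        · rw [if_neg hpc, if_neg hpc]; exact hX r hr1 hr2
      have hpiv1 : (stA1.1.getD col 0).testBit (n - 1 - col) = true := by
        rw [hA1]; by_cases hpc : p ≠ col
        · rw [if_pos hpc]
          dsimp only
          rw [swapIdx_getD _ _ _ _ (hIA.1 ▸ hcol) (hIA.1 ▸ hpn)]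
          by_cases hcp : col = p
          · rw [if_pos hcp, show stA.1.getD col 0 = stA.1.getD p 0 from by rw [hcp]]
            exact hbitA
          · rw [if_neg hcp, if_pos rfl]; exact hbitA
        · rw [if_neg hpc]
          have : p = col := by omega
          exact this ▸ hbitA
      have hpivB1 : (stB1.1.getD col 0).testBit (n - 1 - col) = true := by
        rw [← (hX1 col (le_refl col) hcol).1]; exact hpiv1
      -- the post-elimination states
      obtain ⟨la1, la2, hja⟩ := elimRowsA_spec n col stA1 hIA1.1 hIA1.2.1
      obtain ⟨lb1, lb2, hjb⟩ := elimBelowB_spec n col stB1 hcol hIB1.1 hIB1.2.1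
      have hIA2 : StInv n M (elimRowsA n col stA1) := by
        refine StInv_elim M stA1 _ col hcol hIA1
          (fun j => j < n ∧ j ≠ col ∧ (stA1.1.getD j 0).testBit (n - 1 - col)) la1 la2 ?_ ?_
        · intro j _; exact (hja j).1
        · intro j _; exact (hja j).2
      have hIB2 : StInv n M (elimBelowB n col stB1) := by
        refine StInv_elim M stB1 _ col hcol hIB1
          (fun j => j < n ∧ col < j ∧ (stB1.1.getD j 0).testBit (n - 1 - col)) lb1 lb2 ?_ ?_
        · intro j _; exact (hjb j).1
        · intro j _; exact (hjb j).2
      have hU2 : UnitCols n (elimRowsA n col stA1).1 (col + 1) :=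
        stepA_unit n col stA1 hcol hIA1.1 hIA1.2.1 hU1 hpiv1
      have hT2 : UpperTri n (elimBelowB n col stB1).1 (col + 1) :=
        stepB_tri n col stB1 hcol hIB1.1 hIB1.2.1 hT1 hpivB1
      have hX2 : ∀ r, col + 1 ≤ r → r < n →
          (elimRowsA n col stA1).1.getD r 0 = (elimBelowB n col stB1).1.getD r 0 ∧
          (elimRowsA n col stA1).2.getD r 0 = (elimBelowB n col stB1).2.getD r 0 := by
        intro r hr1 hr2
        have e1 := (hX1 r (by omega) hr2).1
        have e2 := (hX1 r (by omega) hr2).2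
        have ec1 := (hX1 col (le_refl col) hcol).1
        have ec2 := (hX1 col (le_refl col) hcol).2
        have hca : (r < n ∧ r ≠ col ∧ (stA1.1.getD r 0).testBit (n - 1 - col)) ↔
            (r < n ∧ col < r ∧ (stB1.1.getD r 0).testBit (n - 1 - col)) := by
          rw [e1]
          constructor
          · rintro ⟨h1, _, h3⟩; exact ⟨h1, by omega, h3⟩
          · rintro ⟨h1, _, h3⟩; exact ⟨h1, by omega, h3⟩
        constructor
        · rw [(hja r).1, (hjb r).1]
          by_cases hc : r < n ∧ col < r ∧ (stB1.1.getD r 0).testBit (n - 1 - col)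
          · rw [if_pos (hca.mpr hc), if_pos hc, e1, ec1]
          · rw [if_neg (fun h => hc (hca.mp h)), if_neg hc, e1]
        · rw [(hja r).2, (hjb r).2]
          by_cases hc : r < n ∧ col < r ∧ (stB1.1.getD r 0).testBit (n - 1 - col)
          · rw [if_pos (hca.mpr hc), if_pos hc, e2, ec2]
          · rw [if_neg (fun h => hc (hca.mp h)), if_neg hc, e2]
      exact ih (col + 1) (elimRowsA n col stA1) (elimBelowB n col stB1)
        (by omega) (by omega) hIA2 hIB2 hU2 hT2 hX2

-- 9. back-substitution: clears everything above the diagonal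
lemma back_lemma (n : Nat) (M : Matrix (Fin n) (Fin n) (ZMod 2)) :
    ∀ k st, k ≤ n → StInv n M st → UpperTri n st.1 n →
    (∀ c, k ≤ c → c < n → ∀ r, r < n → r ≠ c → bz (st.1.getD r 0) (n - 1 - c) = 0) →
    StInv n M (backB n k st) ∧
    (∀ c, c < n → ∀ r, r < n →
      bz ((backB n k st).1.getD r 0) (n - 1 - c) = if r = c then 1 else 0) := by
  intro k
  induction k with
  | zero =>
    intro st _ hI hT hcl
    refine ⟨hI, ?_⟩
    intro c hc r hr
    by_cases hrc : r = c
    · subst hrc; rw [if_pos rfl]; exact (hT r hc).1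
    · rw [if_neg hrc]; exact hcl c (Nat.zero_le c) hc r hr hrc
  | succ k ih =>
    intro st hk hI hT hcl
    have hkn : k < n := by omega
    show StInv n M (backB n k (elimAboveB n k st)) ∧ _
    obtain ⟨l1, l2, hj⟩ := elimAboveB_spec n k st hkn hI.1 hI.2.1
    -- row k of st is zero on every column other than k (zero left of the diagonal by
    -- UpperTri, zero right of it by the already-cleared columns > k)
    have hrowk : ∀ c, c < n → c ≠ k → bz (st.1.getD k 0) (n - 1 - c) = 0 := by
      intro c hc hck
      by_cases hlt : c < k
      · exact (hT c hc).2 k hlt hkn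
      · exact hcl c (by omega) hc k hkn (Ne.symm hck)
    have hI' : StInv n M (elimAboveB n k st) := by
      refine StInv_elim M st _ k hkn hI
        (fun j => j < k ∧ (st.1.getD j 0).testBit (n - 1 - k)) l1 l2 ?_ ?_
      · intro j _; exact (hj j).1
      · intro j _; exact (hj j).2
    have hT' : UpperTri n (elimAboveB n k st).1 n := by
      intro c hc
      constructor
      · rw [(hj c).1]
        by_cases hcnd : c < k ∧ (st.1.getD c 0).testBit (n - 1 - k)
        · rw [if_pos hcnd, bz_xor, (hT c hc).1, hrowk c hc (by omega), add_zero]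
        · rw [if_neg hcnd]; exact (hT c hc).1
      · intro r hrc hrn
        rw [(hj r).1]
        by_cases hcnd : r < k ∧ (st.1.getD r 0).testBit (n - 1 - k)
        · rw [if_pos hcnd, bz_xor, (hT c hc).2 r hrc hrn,
            hrowk c hc (by omega), add_zero]
        · rw [if_neg hcnd]; exact (hT c hc).2 r hrc hrn
    have hcl' : ∀ c, k ≤ c → c < n → ∀ r, r < n → r ≠ c →
        bz ((elimAboveB n k st).1.getD r 0) (n - 1 - c) = 0 := by
      intro c hkc hc r hr hrc
      rw [(hj r).1]
      by_cases hck : c = k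
      · subst hck
        by_cases hcnd : r < c ∧ (st.1.getD r 0).testBit (n - 1 - c)
        · rw [if_pos hcnd, bz_xor, bz_true hcnd.2, (hT c hc).1]
          exact two_eq_zero
        · rw [if_neg hcnd]
          by_cases hlt : r < c
          · have : (st.1.getD r 0).testBit (n - 1 - c) = false := by
              by_contra h
              exact hcnd ⟨hlt, by simpa using h⟩
            exact bz_false this
          · exact (hT c hc).2 r (by omega) hr
      · have hkc' : k + 1 ≤ c := by omega
        by_cases hcnd : r < k ∧ (st.1.getD r 0).testBit (n - 1 - k)
        · rw [if_pos hcnd, bz_xor,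
            hcl c hkc' hc r hr hrc, hcl c hkc' hc k hkn (by omega), add_zero]
        · rw [if_neg hcnd]; exact hcl c hkc' hc r hr hrc
    exact ih (elimAboveB n k st) (by omega) hI' hT' hcl'

-- 10. initial state, uniqueness of the inverse, and extraction back to Int lists
lemma getD_map_range (n : Nat) (f : Nat → Int) (r : Nat) (hr : r < n) :
    ((List.range n).map f).getD r 0 = f r := by
  simp [List.getD, List.getElem?_map, List.getElem?_range, hr]

lemma shiftLeft_one_eq (i : Nat) : Int.shiftLeft 1 i = ((2 ^ i : Nat) : Int) := by
  have : Int.shiftLeft 1 i = Int.ofNat (1 <<< i) := rfl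
  rw [this, Nat.shiftLeft_eq, one_mul]
  rfl

lemma shiftLeft_one_bound (i n : Nat) (h : i < n) :
    0 ≤ Int.shiftLeft 1 i ∧ Int.shiftLeft 1 i < 2 ^ n := by
  rw [shiftLeft_one_eq]
  constructor
  · exact Int.ofNat_nonneg _
  · exact_mod_cast Nat.pow_lt_pow_right (by omega) h

lemma int_eq_of_bits (n : Nat) (x y : Int) (hx0 : 0 ≤ x) (hx : x < 2 ^ n)
    (hy0 : 0 ≤ y) (hy : y < 2 ^ n) (h : ∀ k, k < n → x.testBit k = y.testBit k) : x = y := by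
  obtain ⟨a, rfl⟩ := Int.eq_ofNat_of_zero_le hx0
  obtain ⟨b, rfl⟩ := Int.eq_ofNat_of_zero_le hy0
  have ha : a < 2 ^ n := by exact_mod_cast hx
  have hb : b < 2 ^ n := by exact_mod_cast hy
  congr 1
  apply Nat.eq_of_testBit_eq
  intro k
  by_cases hk : k < n
  · have := h k hk
    simpa [Int.testBit] using this
  · rw [Nat.testBit_lt_two_pow (lt_of_lt_of_le ha (Nat.pow_le_pow_right (by omega) (by omega))),
      Nat.testBit_lt_two_pow (lt_of_lt_of_le hb (Nat.pow_le_pow_right (by omega) (by omega)))]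

lemma matOf_id (n : Nat) :
    matOf n ((List.range n).map (fun r => Int.shiftLeft 1 (n - 1 - r))) = 1 := by
  ext r c
  show bz (((List.range n).map (fun r => Int.shiftLeft 1 (n - 1 - r))).getD r.val 0)
      (n - 1 - c.val) = _
  rw [getD_map_range n _ r.val r.isLt, bz_pow2, Matrix.one_apply]
  have hr := r.isLt; have hc := c.isLt
  by_cases h : r = c
  · rw [if_pos h, if_pos (by rw [h])]
  · rw [if_neg h, if_neg (by
      intro he
      exact h (Fin.ext (by omega)))]

lemma matOf_eq_one_of_unit {n : Nat} (xs : List Int) (hU : UnitCols n xs n) :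
    matOf n xs = 1 := by
  ext r c
  show bz (xs.getD r.val 0) (n - 1 - c.val) = _
  rw [hU c.val c.isLt r.val r.isLt, Matrix.one_apply]
  by_cases h : r = c
  · rw [if_pos (by rw [h]), if_pos h]
  · rw [if_neg (fun he => h (Fin.ext he)), if_neg h]

theorem gf2_invert_unconditional (rows : List Int) : gf2_invert rows = gf2_invert_alt rows := by
  unfold gf2_invert gf2_invert_alt
  show (match loopA rows.length 0
        (rows, (List.range rows.length).map (fun r => Int.shiftLeft 1 (rows.length - 1 - r))) with
      | some st => st.2
      | none => []) =
    (match forwardB rows.length 0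
        (rows, (List.range rows.length).map (fun r => Int.shiftLeft 1 (rows.length - 1 - r))) with
      | some st => (backB rows.length rows.length st).2
      | none => [])
  set n := rows.length with hn
  set I0 := (List.range n).map (fun r => Int.shiftLeft 1 (n - 1 - r)) with hI0
  set M := matOf n rows with hM
  have hInv0 : StInv n M (rows, I0) := by
    refine ⟨rfl, by simp [hI0], ?_, ?_⟩
    · intro r hr
      rw [hI0, getD_map_range n _ r hr]
      exact shiftLeft_one_bound _ _ (by omega)
    · show matOf n I0 * M = matOf n rows
      rw [hI0, matOf_id, Matrix.one_mul, hM]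
  have hstart := forward_joint n M (n - 0) 0 (rows, I0) (rows, I0) rfl (Nat.zero_le n)
    hInv0 hInv0 (fun c hc => absurd hc (by omega)) (fun c hc => absurd hc (by omega))
    (fun r _ _ => ⟨rfl, rfl⟩)
  rcases hstart with ⟨hA, hB⟩ | ⟨stA', stB', hA, hB, invA, invB, unitA, triB⟩
  · rw [hA, hB]
  · rw [hA, hB]
    show stA'.2 = (backB n n stB').2
    obtain ⟨invBk, unitBk⟩ := back_lemma n M n stB' le_rfl invB triB
      (fun c hc1 hc2 => absurd hc1 (by omega))
    have hXM : matOf n stA'.2 * M = 1 := by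
      rw [invA.2.2.2, matOf_eq_one_of_unit stA'.1 unitA]
    have hYunit : UnitCols n (backB n n stB').1 n := fun c hc r hr => unitBk c hc r hr
    have hYM : matOf n (backB n n stB').2 * M = 1 := by
      rw [invBk.2.2.2, matOf_eq_one_of_unit _ hYunit]
    have hMY : M * matOf n (backB n n stB').2 = 1 := mul_eq_one_comm.mp hYM
    have hXY : matOf n stA'.2 = matOf n (backB n n stB').2 := by
      calc matOf n stA'.2 = matOf n stA'.2 * (M * matOf n (backB n n stB').2) := by
            rw [hMY, Matrix.mul_one]
        _ = (matOf n stA'.2 * M) * matOf n (backB n n stB').2 := by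
            rw [Matrix.mul_assoc]
        _ = matOf n (backB n n stB').2 := by rw [hXM, Matrix.one_mul]
    apply List.ext_getElem (by rw [invA.2.1, invBk.2.1])
    intro i h1 h2
    have hi : i < n := by rw [← invA.2.1]; exact h1
    have e1 : stA'.2[i] = stA'.2.getD i 0 := (List.getD_eq_getElem _ _ h1).symm
    have e2 : (backB n n stB').2[i] = (backB n n stB').2.getD i 0 :=
      (List.getD_eq_getElem _ _ h2).symm
    rw [e1, e2]
    have bA := invA.2.2.1 i hi
    have bB := invBk.2.2.1 i hi
    apply int_eq_of_bits n _ _ bA.1 bA.2 bB.1 bB.2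
    intro k hk
    have hc : n - 1 - k < n := by omega
    have := congrFun (congrFun hXY ⟨i, hi⟩) ⟨n - 1 - k, hc⟩
    have hbz : bz (stA'.2.getD i 0) k = bz ((backB n n stB').2.getD i 0) k := by
      have hk' : n - 1 - (n - 1 - k) = k := by omega
      simpa [matOf, hk'] using this
    by_cases h1 : (stA'.2.getD i 0).testBit k
    · by_cases h2 : ((backB n n stB').2.getD i 0).testBit k
      · rw [h1, h2]
      · rw [bz_true h1, bz_false (by simpa using h2)] at hbz
        exact absurd hbz (by decide)
    · by_cases h2 : ((backB n n stB').2.getD i 0).testBit k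
      · rw [bz_false (by simpa using h1), bz_true h2] at hbz
        exact absurd hbz (by decide)
      · rw [Bool.eq_false_iff.mpr h1, Bool.eq_false_iff.mpr h2]

-- ===== VERDICT (by name: the statement is the Claim_ definition above) =====
theorem gf2_invert_spec : Claim_equal_gf2_invert := by
  intro rows _ _
  unfold Spec_gf2_invert
  exact gf2_invert_unconditional rows
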